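-- pv_equiv track=rewrite | github.com/bundesAPI/handelsregister | handelsregister.py | _parse_history
-- ===== SOURCE A (Python) =====
-- def _parse_history(cells: list[str]) -> list[tuple[str, str]]:
--     """Parses history entries from cell data.
--
--     Args:
--         cells: List of cell text content.
--
--     Returns:
--         List of (name, location) tuples.
--     """
--     history: list[tuple[str, str]] = []
--     hist_start = 8
--
--     for i in range(hist_start, len(cells), 3):
--         if i + 1 >= len(cells):
--             break
--         if "Branches" in cells[i] or "Niederlassungen" in cells[i]:
--             break
--         history.append((cells[i], cells[i + 1]))
--
--     return history
-- ===== SOURCE B (Python) =====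
-- def _take_ok(pairs):
--     out = []
--     for name, loc in pairs:
--         if "Branches" in name or "Niederlassungen" in name:
--             break
--         out.append((name, loc))
--     return out
--
--
-- def _parse_history(cells: list[str]) -> list[tuple[str, str]]:
--     """Pair the strided name/location slices and keep entries up to the sentinel."""
--     return _take_ok(zip(cells[8::3], cells[9::3]))
-- ===== Notes on version B (the rewrite author's own statement) =====
-- stated objective: alternative
-- what changed: Replaces the indexed range(8,len,3) loop with two break conditions by zipping the strided slices cells[8::3] and cells[9::3] (zip exhaustion replaces the i+1>=len break) and a recursive prefix-taker that stops at the first sentinel name.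
import Mathlib
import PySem

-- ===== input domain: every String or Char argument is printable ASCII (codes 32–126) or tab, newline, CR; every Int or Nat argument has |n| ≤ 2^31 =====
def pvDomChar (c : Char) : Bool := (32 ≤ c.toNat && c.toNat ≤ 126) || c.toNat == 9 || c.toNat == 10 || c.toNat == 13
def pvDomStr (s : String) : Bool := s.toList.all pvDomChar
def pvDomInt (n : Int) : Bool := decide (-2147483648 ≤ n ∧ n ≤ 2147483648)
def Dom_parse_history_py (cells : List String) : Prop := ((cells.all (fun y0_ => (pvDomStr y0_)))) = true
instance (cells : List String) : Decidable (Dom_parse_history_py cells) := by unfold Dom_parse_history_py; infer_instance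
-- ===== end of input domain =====

-- B replaces A's indexed range(8,len,3) loop (with its two breaks) by zipping the strided
-- slices cells[8::3]/cells[9::3] and recursively taking the prefix before the sentinel name.


-- ===== PORT A =====
-- the for-loop over range(8, len(cells), 3): both `break`s return the history built so far
def parseHistLoopA (cells : List String) (i : Nat) : List (String × String) :=
  if _h : i + 1 < cells.length then
    let name := cells.getD i ""
    if PySem.Str.isIn "Branches" name || PySem.Str.isIn "Niederlassungen" name then []
    else (name, cells.getD (i + 1) "") :: parseHistLoopA cells (i + 3)
  else []
termination_by cells.length - i

def parse_history_py (cells : List String) : List (String × String) :=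
  parseHistLoopA cells 8

-- ===== PORT B =====
-- _take_ok: recursive prefix before the first sentinel name
def takeOkB : List (String × String) → List (String × String)
  | [] => []
  | p :: rest =>
    if PySem.Str.isIn "Branches" p.1 || PySem.Str.isIn "Niederlassungen" p.1 then []
    else p :: takeOkB rest

def parse_history_py_alt (cells : List String) : List (String × String) :=
  takeOkB (((PySem.List.slice? cells (some 8) none 3).getD []).zip
           ((PySem.List.slice? cells (some 9) none 3).getD []))

-- ===== PRECONDITION & SPEC =====
def Spec_parse_history_py (cells : List String) (out : List (String × String)) : Prop := out = parse_history_py_alt cells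
instance (cells : List String) (out : List (String × String)) : Decidable (Spec_parse_history_py cells out) := by unfold Spec_parse_history_py; infer_instance

-- ===== CLAIM (what is proved, stated in full; the proofs are below) =====
def Claim_equal_parse_history_py : Prop := ∀ (cells : List String), Dom_parse_history_py cells → Spec_parse_history_py cells (parse_history_py cells)

-- ===== LEMMAS AND PROOFS =====

-- every third element, starting at the head (proof-side view of a [a::3] slice)
def strideList : List String → List String
  | [] => []
  | x :: rest => x :: strideList (rest.drop 2)
termination_by l => l.length
decreasing_by simp

lemma strideList_nil : strideList [] = [] := by
  rw [strideList]

lemma strideList_cons (x : String) (rest : List String) :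
    strideList (x :: rest) = x :: strideList (rest.drop 2) := by
  rw [strideList]

lemma drop_drop' (l : List String) (m n k : Nat) (h : m + n = k) :
    (l.drop m).drop n = l.drop k := by
  subst h; rw [List.drop_drop]

lemma strideList_drop (xs : List String) (i : Nat) (h : i < xs.length) :
    strideList (xs.drop i) = xs[i] :: strideList (xs.drop (i + 3)) := by
  rw [List.drop_eq_getElem_cons h, strideList_cons, drop_drop' xs (i + 1) 2 (i + 3) (by omega)]

lemma filterMap_stride (xs : List String) (s : Nat) :
    List.filterMap (fun k => xs[s + 3 * k]?) (List.range ((xs.length - s + 2) / 3)) =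
      strideList (xs.drop s) := by
  by_cases h : s < xs.length
  · have hc : (xs.length - s + 2) / 3 = (xs.length - (s + 3) + 2) / 3 + 1 := by omega
    rw [hc, List.range_succ_eq_map, List.filterMap_cons, List.filterMap_map]
    have hfun : ((fun k => xs[s + 3 * k]?) ∘ (· + 1)) = (fun k => xs[(s + 3) + 3 * k]?) := by
      funext k; simp only [Function.comp]; congr 1
      omega
    rw [hfun, filterMap_stride xs (s + 3), strideList_drop xs s h]
    have h0 : xs[s + 3 * 0]? = some xs[s] := by
      simp [List.getElem?_eq_getElem h]
    rw [h0]
  · have hc : (xs.length - s + 2) / 3 = 0 := by omega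
    rw [hc, List.drop_eq_nil_of_le (by omega)]
    simp [strideList_nil]
termination_by xs.length - s

lemma slice3_eq_stride (xs : List String) (a : Nat) :
    (PySem.List.slice? xs (some (a : Int)) none 3).getD [] = strideList (xs.drop a) := by
  have h3 : (3 : Int) ≠ 0 := by norm_num
  have hneg : ¬((3 : Int) < 0) := by norm_num
  have hpos : (0 : Int) < 3 := by norm_num
  have ha0 : ¬((a : Int) < 0) := by omega
  simp only [PySem.List.slice?, PySem.List.sliceIndices, if_neg h3, if_neg hneg, if_neg ha0,
    if_pos hpos, Option.getD_some]
  by_cases h : a < xs.length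
  · have hs : min (a : Int) (xs.length : Int) = (a : Int) :=
      min_eq_left (by omega)
    rw [hs]
    have hlt : (a : Int) < (xs.length : Int) := by exact_mod_cast h
    rw [if_pos hlt]
    have hcnt : (((xs.length : Int) - a + 3 - 1) / 3).toNat = (xs.length - a + 2) / 3 := by
      omega
    rw [hcnt]
    have hfun : (fun k : Nat => xs[((a : Int) + 3 * (k : Int)).toNat]?) =
        (fun k : Nat => xs[a + 3 * k]?) := by
      funext k; congr 1
    rw [hfun, filterMap_stride]
  · have hs : min (a : Int) (xs.length : Int) = (xs.length : Int) :=
      min_eq_right (by omega)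
    rw [hs]
    rw [if_neg (show ¬((xs.length : Int) < (xs.length : Int)) by omega)]
    rw [List.drop_eq_nil_of_le (by omega)]
    simp [strideList_nil]

lemma loopA_eq_takeOk (cells : List String) (i : Nat) :
    parseHistLoopA cells i =
      takeOkB ((strideList (cells.drop i)).zip (strideList (cells.drop (i + 1)))) := by
  rw [parseHistLoopA]
  by_cases h : i + 1 < cells.length
  · rw [dif_pos h]
    have hi : i < cells.length := by omega
    rw [strideList_drop cells i hi, strideList_drop cells (i + 1) h,
        show i + 1 + 3 = i + 4 from by omega]
    simp only [List.zip_cons_cons, takeOkB]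
    have hg1 : cells.getD i "" = cells[i] := List.getD_eq_getElem cells _ hi
    have hg2 : cells.getD (i + 1) "" = cells[i + 1] := List.getD_eq_getElem cells _ h
    rw [hg1, hg2, loopA_eq_takeOk cells (i + 3)]
  · rw [dif_neg h]
    rw [List.drop_eq_nil_of_le (show cells.length ≤ i + 1 by omega)]
    simp [strideList_nil, takeOkB]
termination_by cells.length - i

-- ===== VERDICT (by name: the statement is the Claim_ definition above) =====
theorem parse_history_py_spec : Claim_equal_parse_history_py := by
  intro cells _
  unfold Spec_parse_history_py parse_history_py parse_history_py_alt
  rw [loopA_eq_takeOk cells 8]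
  rw [show ((8 : Int)) = ((8 : Nat) : Int) by norm_num,
      show ((9 : Int)) = ((9 : Nat) : Int) by norm_num,
      slice3_eq_stride cells 8, slice3_eq_stride cells 9]
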